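-- pv_equiv track=rewrite | github.com/vtr57/Meta-Dashboard-Backend | empresa/api_views.py | _parse_ids_param
-- ===== SOURCE A (Python) =====
-- def _parse_ids_param(raw_ids: str):
--     values = []
--     seen = set()
--     for chunk in raw_ids.split(','):
--         item = chunk.strip()
--         if not item:
--             continue
--         if not item.isdigit():
--             return None
--         parsed = int(item)
--         if parsed <= 0:
--             return None
--         if parsed in seen:
--             continue
--         seen.add(parsed)
--         values.append(parsed)
--     return values
-- ===== SOURCE B (Python) =====
-- def _parse_ids_param(raw_ids: str):
--     # Structural recursion on the chunk list: no seen-set; dedup by removing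
--     # later occurrences of the head value from the recursively parsed suffix.
--     def go(chunks):
--         if not chunks:
--             return []
--         item = chunks[0].strip()
--         if not item:
--             return go(chunks[1:])
--         if not item.isdigit():
--             return None
--         v = int(item)
--         if v <= 0:
--             return None
--         tail = go(chunks[1:])
--         if tail is None:
--             return None
--         return [v] + [x for x in tail if x != v]
--     return go(raw_ids.split(','))
-- ===== Notes on version B (the rewrite author's own statement) =====
-- stated objective: alternative
-- what changed: Replaced A's iterative loop maintaining a seen set (skip a value if already seen) by a structural recursion over the chunk list with no seen state at all: each valid head value is prepended and its later duplicates are removed by filtering them out of the recursively computed suffix result.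
import Mathlib
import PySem

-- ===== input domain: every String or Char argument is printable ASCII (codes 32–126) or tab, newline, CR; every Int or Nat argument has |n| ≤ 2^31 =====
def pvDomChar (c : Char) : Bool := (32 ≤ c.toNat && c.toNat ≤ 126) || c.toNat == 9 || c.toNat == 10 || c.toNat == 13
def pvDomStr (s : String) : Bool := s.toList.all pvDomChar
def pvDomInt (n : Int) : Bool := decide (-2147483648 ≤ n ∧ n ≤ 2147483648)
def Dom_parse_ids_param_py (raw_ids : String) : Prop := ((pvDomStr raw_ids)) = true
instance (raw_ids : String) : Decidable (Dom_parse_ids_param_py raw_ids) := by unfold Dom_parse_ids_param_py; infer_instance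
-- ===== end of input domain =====

-- B replaces A's iterative loop with a seen set by a structural recursion with no seen state:
-- each valid head value is prepended and its later duplicates are filtered out of the
-- recursively parsed suffix (objective: alternative decomposition, same cost class).

-- ===== PORT A =====
-- int(item): on the ASCII domain item.isdigit() guarantees int() succeeds, so getD 0 is unreachable
def pvVal (item : String) : Int := (PySem.Int.ofStr? item).getD 0

def parseA_loop : List String → List Int → PySem.Set Int → Option (List Int)
  | [], values, _ => some values
  | chunk :: rest, values, seen =>
    let item := PySem.Str.strip chunk
    if item = "" then parseA_loop rest values seen
    else if ¬ PySem.Str.strIsdigit item then none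
    else
      let parsed := pvVal item
      if parsed ≤ 0 then none
      else if PySem.Set.contains seen parsed then parseA_loop rest values seen
      else parseA_loop rest (values ++ [parsed]) (PySem.Set.add seen parsed)

def parse_ids_param_py (raw_ids : String) : Option (List Int) :=
  parseA_loop ((PySem.Str.split? raw_ids ",").getD []) [] PySem.Set.empty

-- ===== PORT B =====
def parseB_go : List String → Option (List Int)
  | [] => some []
  | chunk :: rest =>
    let item := PySem.Str.strip chunk
    if item = "" then parseB_go rest
    else if ¬ PySem.Str.strIsdigit item then none
    else
      let v := pvVal item
      if v ≤ 0 then none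
      else
        match parseB_go rest with
        | none => none
        | some tail => some (v :: tail.filter (fun x => x ≠ v))

def parse_ids_param_py_alt (raw_ids : String) : Option (List Int) :=
  parseB_go ((PySem.Str.split? raw_ids ",").getD [])

-- ===== PRECONDITION & SPEC =====
def Spec_parse_ids_param_py (raw_ids : String) (out : Option (List Int)) : Prop := out = parse_ids_param_py_alt raw_ids
instance (raw_ids : String) (out : Option (List Int)) : Decidable (Spec_parse_ids_param_py raw_ids out) := by unfold Spec_parse_ids_param_py; infer_instance

-- ===== CLAIM (what is proved, stated in full; the proofs are below) =====
def Claim_equal_parse_ids_param_py : Prop := ∀ (raw_ids : String), Dom_parse_ids_param_py raw_ids → Spec_parse_ids_param_py raw_ids (parse_ids_param_py raw_ids)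

-- ===== LEMMAS AND PROOFS =====
-- filtering: removing v then removing members of values
lemma filter_swallow (v : Int) (values r : List Int) (hmem : v ∈ values) :
    (r.filter (fun x => x ≠ v)).filter (fun x => x ∉ values)
      = r.filter (fun x => x ∉ values) := by
  rw [List.filter_filter]
  apply List.filter_congr
  intro x _
  by_cases hx : x ∈ values
  · simp [hx]
  · have : x ≠ v := fun h => hx (h ▸ hmem)
    simp [hx, this]

lemma filter_snoc (v : Int) (values r : List Int) :
    (r.filter (fun x => x ≠ v)).filter (fun x => x ∉ values)
      = r.filter (fun x => x ∉ values ++ [v]) := by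
  rw [List.filter_filter]
  apply List.filter_congr
  intro x _
  by_cases hx : x = v
  · simp [hx]
  · simp [hx]

-- loop invariant: with seen = values, A's loop appends exactly B's recursive
-- result with the values already in the accumulator filtered away
lemma parseA_loop_eq_go (l : List String) (values : List Int) :
    parseA_loop l values values =
      (parseB_go l).map (fun r => values ++ r.filter (fun x => x ∉ values)) := by
  induction l generalizing values with
  | nil => simp [parseA_loop, parseB_go]
  | cons chunk rest ih =>
    by_cases hemp : PySem.Str.strip chunk = ""
    · simp [parseA_loop, parseB_go, hemp, ih]
    · by_cases hdig : PySem.Str.strIsdigit (PySem.Str.strip chunk)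
      all_goals simp only [PySem.Str.strIsdigit_eq, PySem.Str.toList_strip] at hdig
      · by_cases hpos : pvVal (PySem.Str.strip chunk) ≤ 0
        · simp [parseA_loop, parseB_go, hemp, hdig, hpos]
        · by_cases hmem : pvVal (PySem.Str.strip chunk) ∈ values
          · cases hrec : parseB_go rest with
            | none =>
              simp [parseA_loop, parseB_go, hemp, hdig, hpos, hmem,
                PySem.Set.contains, ih, hrec]
            | some tail =>
              have hf := filter_swallow (pvVal (PySem.Str.strip chunk)) values tail hmem
              simp only [ne_eq, decide_not] at hf
              simp [parseA_loop, parseB_go, hemp, hdig, hpos, hmem,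
                PySem.Set.contains, ih, hrec, hf]
          · cases hrec : parseB_go rest with
            | none =>
              simp [parseA_loop, parseB_go, hemp, hdig, hpos, hmem,
                PySem.Set.contains, hrec,
                ih (values ++ [pvVal (PySem.Str.strip chunk)])]
            | some tail =>
              have hf := filter_snoc (pvVal (PySem.Str.strip chunk)) values tail
              simp only [ne_eq, decide_not] at hf
              simp [parseA_loop, parseB_go, hemp, hdig, hpos, hmem,
                PySem.Set.contains, hrec, hf,
                ih (values ++ [pvVal (PySem.Str.strip chunk)])]
      · simp [parseA_loop, parseB_go, hemp, hdig]

-- ===== VERDICT (by name: the statement is the Claim_ definition above) =====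
theorem parse_ids_param_py_spec : Claim_equal_parse_ids_param_py := by
  intro raw_ids _
  unfold Spec_parse_ids_param_py parse_ids_param_py parse_ids_param_py_alt
  rw [show (PySem.Set.empty : PySem.Set Int) = ([] : List Int) from rfl, parseA_loop_eq_go]
  cases parseB_go ((PySem.Str.split? raw_ids ",").getD []) <;> simp
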